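-- pv_equiv track=rewrite | github.com/Haiwei1027/aoc-2023 | day12/solver.py | unknown_replace
-- ===== SOURCE A (Python) =====
-- def run_length_append(encoded,new):
--     if len(encoded) == 0:
--         encoded.append(new)
--         return
--     if encoded[-1][1] == new[1]:
--         encoded[-1] = (encoded[-1][0]+new[0], new[1])
--     else:
--         encoded.append(new)
--     return
--
-- def unknown_replace(springs, replacement):
--     output = []
--     replaced = False
--     for i,spring in enumerate(springs):
--         if '?' == spring[1] and not replaced:
--             run_length_append(output, (1,replacement))
--             if (spring[0] > 1):
--                 run_length_append(output, (spring[0]-1,'?'))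
--                 pass
--             replaced = True
--         else:
--             run_length_append(output, spring)
--     return output
-- ===== SOURCE B (Python) =====
-- def unknown_replace(springs, replacement):
--     # Phase 1: build the un-merged run list, replacing the first '?' run.
--     built = None
--     for i, (c, s) in enumerate(springs):
--         if s == '?':
--             built = springs[:i] + [(1, replacement)] + ([(c - 1, '?')] if c > 1 else []) + springs[i + 1:]
--             break
--     if built is None:
--         built = list(springs)
--     # Phase 2: coalesce consecutive runs sharing a symbol.
--     if not built:
--         return []
--     cur_c, cur_s = built[0]
--     out = []
--     for c, s in built[1:]:
--         if s == cur_s: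
--             cur_c += c
--         else:
--             out.append((cur_c, cur_s))
--             cur_c, cur_s = c, s
--     out.append((cur_c, cur_s))
--     return out
-- ===== Notes on version B (the rewrite author's own statement) =====
-- stated objective: alternative
-- what changed: Splits A's single flag-driven loop with merge-as-you-go appends into two separate passes: first build an un-merged run list with the first '?' run replaced by (1,replacement) plus an optional (count-1,'?') remainder, then a forward coalescing pass that merges consecutive equal-symbol runs.
import Mathlib
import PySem

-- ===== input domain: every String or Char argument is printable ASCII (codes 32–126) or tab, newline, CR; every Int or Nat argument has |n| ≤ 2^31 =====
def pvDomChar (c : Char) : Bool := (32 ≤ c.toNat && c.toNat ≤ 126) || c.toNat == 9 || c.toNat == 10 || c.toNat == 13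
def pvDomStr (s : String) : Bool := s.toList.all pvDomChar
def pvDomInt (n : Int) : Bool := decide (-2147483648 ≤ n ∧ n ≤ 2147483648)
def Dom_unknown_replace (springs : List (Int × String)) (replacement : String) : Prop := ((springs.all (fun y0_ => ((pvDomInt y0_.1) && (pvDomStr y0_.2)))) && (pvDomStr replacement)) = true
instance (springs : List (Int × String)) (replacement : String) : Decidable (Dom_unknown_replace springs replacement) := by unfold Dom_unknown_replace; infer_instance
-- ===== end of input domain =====

-- B splits A's single flag-driven, merge-as-you-go loop into a build phase (replace the
-- first '?' run, no merging) followed by a separate forward coalescing pass (alternative decomposition).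


-- ===== PORT A =====
-- run_length_append: A mutates `encoded` in place; the port returns the new list.
def rla (encoded : List (Int × String)) (new : Int × String) : List (Int × String) :=
  match encoded.getLast? with
  | none => encoded ++ [new]            -- len(encoded) == 0
  | some last =>
    if last.2 == new.2 then encoded.dropLast ++ [(last.1 + new.1, new.2)]
    else encoded ++ [new]

-- one iteration of A's loop body over state (output, replaced)
def stepA (replacement : String) (st : List (Int × String) × Bool) (spring : Int × String) :
    List (Int × String) × Bool :=
  if spring.2 == "?" && !st.2 then
    let o := rla st.1 (1, replacement)
    let o := if spring.1 > 1 then rla o (spring.1 - 1, "?") else o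
    (o, true)
  else (rla st.1 spring, st.2)

def unknown_replace (springs : List (Int × String)) (replacement : String) : List (Int × String) :=
  (springs.foldl (stepA replacement) ([], false)).1

-- ===== PORT B =====
-- phase 1: replace the first '?' run, keeping everything else verbatim, no merging
def buildB (springs : List (Int × String)) (replacement : String) : List (Int × String) :=
  match springs with
  | [] => []
  | (c, s) :: rest =>
    if s == "?" then (1, replacement) :: (if c > 1 then [(c - 1, "?")] else []) ++ rest
    else (c, s) :: buildB rest replacement

-- phase 2: coalesce consecutive runs with equal symbols, carrying the current run
def coalesceFrom : (Int × String) → List (Int × String) → List (Int × String)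
  | p, [] => [p]
  | p, (c, s) :: rest =>
    if s == p.2 then coalesceFrom (p.1 + c, p.2) rest
    else p :: coalesceFrom (c, s) rest

def coalesce : List (Int × String) → List (Int × String)
  | [] => []
  | x :: rest => coalesceFrom x rest

def unknown_replace_alt (springs : List (Int × String)) (replacement : String) : List (Int × String) :=
  coalesce (buildB springs replacement)

-- ===== PRECONDITION & SPEC =====
def Spec_unknown_replace (springs : List (Int × String)) (replacement : String) (out : List (Int × String)) : Prop := out = unknown_replace_alt springs replacement
instance (springs : List (Int × String)) (replacement : String) (out : List (Int × String)) : Decidable (Spec_unknown_replace springs replacement out) := by unfold Spec_unknown_replace; infer_instance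

-- ===== CLAIM (what is proved, stated in full; the proofs are below) =====
def Claim_equal_unknown_replace : Prop := ∀ (springs : List (Int × String)) (replacement : String), Dom_unknown_replace springs replacement → Spec_unknown_replace springs replacement (unknown_replace springs replacement)

-- ===== LEMMAS AND PROOFS =====

theorem rla_snoc (a : List (Int × String)) (p new : Int × String) :
    rla (a ++ [p]) new =
      if p.2 == new.2 then a ++ [(p.1 + new.1, new.2)] else a ++ [p] ++ [new] := by
  simp [rla]

theorem foldl_rla_coalesceFrom (xs : List (Int × String)) :
    ∀ (a : List (Int × String)) (p : Int × String),
      xs.foldl rla (a ++ [p]) = a ++ coalesceFrom p xs := by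
  induction xs with
  | nil => intro a p; simp [coalesceFrom]
  | cons x xs ih =>
    intro a p
    obtain ⟨c, s⟩ := x
    simp only [List.foldl_cons, rla_snoc, coalesceFrom]
    by_cases h : s = p.2
    · simp only [h, beq_self_eq_true, if_true]
      exact ih a (p.1 + c, p.2)
    · have h1 : (p.2 == s) = false := by simp [beq_eq_false_iff_ne]; exact fun e => h e.symm
      have h2 : (s == p.2) = false := by simp [beq_eq_false_iff_ne]; exact h
      simp only [h1, h2]
      have := ih (a ++ [p]) (c, s)
      simpa using this

theorem foldl_rla_coalesce (xs : List (Int × String)) :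
    xs.foldl rla [] = coalesce xs := by
  cases xs with
  | nil => rfl
  | cons x rest =>
    have := foldl_rla_coalesceFrom rest [] x
    simpa [coalesce] using this

-- after the replacement has happened, A's loop is a plain rla-fold
theorem foldl_stepA_true (replacement : String) (xs : List (Int × String)) :
    ∀ (acc : List (Int × String)),
      (xs.foldl (stepA replacement) (acc, true)).1 = xs.foldl rla acc := by
  induction xs with
  | nil => intro acc; rfl
  | cons x xs ih =>
    intro acc
    have hstep : stepA replacement (acc, true) x = (rla acc x, true) := by
      simp [stepA]
    rw [List.foldl_cons, hstep]
    exact ih (rla acc x)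

-- before the replacement, A's fold equals the rla-fold over B's built list
theorem foldl_stepA_false (replacement : String) (xs : List (Int × String)) :
    ∀ (acc : List (Int × String)),
      (xs.foldl (stepA replacement) (acc, false)).1 = (buildB xs replacement).foldl rla acc := by
  induction xs with
  | nil => intro acc; rfl
  | cons x xs ih =>
    intro acc
    obtain ⟨c, s⟩ := x
    by_cases h : s = "?"
    · subst h
      simp only [List.foldl_cons, stepA, buildB, Bool.not_false, Bool.and_true,
        beq_self_eq_true, if_true]
      by_cases hc : c > 1
      · simp only [if_pos hc]
        rw [foldl_stepA_true]
        simp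
      · simp only [if_neg hc]
        rw [foldl_stepA_true]
        simp
    · have hs : (s == "?") = false := by simp [beq_eq_false_iff_ne]; exact h
      have hstep : stepA replacement (acc, false) (c, s) = (rla acc (c, s), false) := by
        simp [stepA, hs]
      rw [List.foldl_cons, hstep, buildB, if_neg (by simp [hs])]
      exact ih (rla acc (c, s))

-- ===== VERDICT (by name: the statement is the Claim_ definition above) =====
theorem unknown_replace_spec : Claim_equal_unknown_replace := by
  intro springs replacement _
  unfold Spec_unknown_replace unknown_replace unknown_replace_alt
  rw [foldl_stepA_false, foldl_rla_coalesce]
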